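-- pv_equiv track=rewrite | github.com/dancwolf/esp8266openharmony | create.py | merge_call_graphs
-- ===== SOURCE A (Python) =====
-- def merge_call_graphs(graphs):
--     """Merge multiple call graphs"""
--     merged_graph = {}
--     for graph in graphs:
--         for caller, callees in graph.items():
--             if caller not in merged_graph:
--                 merged_graph[caller] = []
--             for callee in callees:
--                 if callee not in merged_graph[caller]:
--                     merged_graph[caller].append(callee)
--     return merged_graph
-- ===== SOURCE B (Python) =====
-- def merge_call_graphs(graphs):
--     """Merge multiple call graphs"""
--     combined = {}
--     for graph in graphs:
--         for caller, callees in graph.items():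
--             combined[caller] = combined.get(caller, []) + list(callees)
--     return {caller: list(dict.fromkeys(callees)) for caller, callees in combined.items()}
-- ===== Notes on version B (the rewrite author's own statement) =====
-- stated objective: alternative
-- what changed: B separates gathering from deduplication: a first pass concatenates all callee lists per caller without any membership tests, and a second pass deduplicates each assembled list once with dict.fromkeys, instead of A's single interleaved append-if-absent loop.
import Mathlib
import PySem

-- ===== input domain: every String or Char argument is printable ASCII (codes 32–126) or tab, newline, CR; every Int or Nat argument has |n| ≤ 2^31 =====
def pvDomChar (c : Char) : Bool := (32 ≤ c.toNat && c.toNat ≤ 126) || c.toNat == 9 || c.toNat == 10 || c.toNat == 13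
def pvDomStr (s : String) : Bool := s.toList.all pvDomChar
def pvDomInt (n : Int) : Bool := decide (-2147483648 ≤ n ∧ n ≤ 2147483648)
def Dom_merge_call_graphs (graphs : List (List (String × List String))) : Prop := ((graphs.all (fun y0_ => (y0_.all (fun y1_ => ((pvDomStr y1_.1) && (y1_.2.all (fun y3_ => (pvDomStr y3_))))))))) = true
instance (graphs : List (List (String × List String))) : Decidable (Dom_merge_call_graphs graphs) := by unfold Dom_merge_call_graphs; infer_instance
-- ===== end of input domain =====

-- B separates gathering from deduplication (concatenate-all then dedup-once via dict.fromkeys) instead of A's interleaved append-if-absent loop; equal return value proved.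


-- ===== PORT A =====
def merge_call_graphs (graphs : List (List (String × List String))) : List (String × List String) :=
  (graphs.foldl (fun merged graph =>
      graph.foldl (fun merged p =>
          let merged := if merged.contains p.1 then merged else merged.insert p.1 ([] : List String)
          p.2.foldl (fun merged callee =>
              merged.modify p.1 [] (fun l => if callee ∈ l then l else l ++ [callee])) merged)
        merged)
    PySem.Dict.empty).items

-- ===== PORT B =====
def merge_call_graphs_alt (graphs : List (List (String × List String))) : List (String × List String) :=
  ((graphs.foldl (fun combined graph =>
      graph.foldl (fun combined p =>
          combined.insert p.1 (combined.getD p.1 [] ++ p.2)) combined)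
    PySem.Dict.empty).items).map (fun p => (p.1, PySem.List.dedup p.2))

-- ===== PRECONDITION & SPEC =====
def Spec_merge_call_graphs (graphs : List (List (String × List String))) (out : List (String × List String)) : Prop := out = merge_call_graphs_alt graphs
instance (graphs : List (List (String × List String))) (out : List (String × List String)) : Decidable (Spec_merge_call_graphs graphs out) := by unfold Spec_merge_call_graphs; infer_instance

-- ===== CLAIM (what is proved, stated in full; the proofs are below) =====
def Claim_equal_merge_call_graphs : Prop := ∀ (graphs : List (List (String × List String))), Dom_merge_call_graphs graphs → Spec_merge_call_graphs graphs (merge_call_graphs graphs)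

-- ===== LEMMAS AND PROOFS =====

-- A's per-(caller, callees) step, named for the proofs (definitionally the lambda in the port of A)
def pvStepA (d : PySem.Dict String (List String)) (p : String × List String) : PySem.Dict String (List String) :=
  let d := if d.contains p.1 then d else d.insert p.1 ([] : List String)
  p.2.foldl (fun d c => d.modify p.1 [] (fun l => if c ∈ l then l else l ++ [c])) d

-- B's per-(caller, callees) step
def pvStepB (d : PySem.Dict String (List String)) (p : String × List String) : PySem.Dict String (List String) :=
  d.insert p.1 (d.getD p.1 [] ++ p.2)

-- the coupling invariant between the two dictionaries
def pvInv (dA dB : PySem.Dict String (List String)) : Prop :=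
  dA.keys = dB.keys ∧ dB.keys.Nodup ∧ ∀ k, dA.getD k [] = PySem.List.dedup (dB.getD k [])

-- appending-if-absent into an already deduplicated list is dedup of the concatenation
theorem pv_dedup_foldl (m cs : List String) :
    cs.foldl (fun l c => if c ∈ l then l else l ++ [c]) (PySem.List.dedup m)
      = PySem.List.dedup (m ++ cs) := by
  induction cs generalizing m with
  | nil => simp
  | cons c cs ih =>
    have hstep : (if c ∈ PySem.List.dedup m then PySem.List.dedup m else PySem.List.dedup m ++ [c])
        = PySem.List.dedup (m ++ [c]) := by
      simp only [PySem.List.dedup_eq_ofList, PySem.Set.ofList_append_singleton,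
        PySem.Set.add_eq_ite]
    calc (c :: cs).foldl (fun l c => if c ∈ l then l else l ++ [c]) (PySem.List.dedup m)
        = cs.foldl (fun l c => if c ∈ l then l else l ++ [c]) (PySem.List.dedup (m ++ [c])) := by
          simp only [List.foldl_cons, hstep]
      _ = PySem.List.dedup ((m ++ [c]) ++ cs) := ih (m ++ [c])
      _ = PySem.List.dedup (m ++ c :: cs) := by simp

-- the callees fold of A, tracked through getD at any key
theorem pv_foldA_getD (cs : List String) (d : PySem.Dict String (List String)) (k k' : String) :
    ((cs.foldl (fun d c => d.modify k [] (fun l => if c ∈ l then l else l ++ [c])) d).getD k' [])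
      = if k' = k then cs.foldl (fun l c => if c ∈ l then l else l ++ [c]) (d.getD k []) else d.getD k' [] := by
  induction cs generalizing d with
  | nil =>
    by_cases h : k' = k
    · subst h; simp
    · simp [h]
  | cons c cs ih =>
    simp only [List.foldl_cons, ih, PySem.Dict.getD_modify]
    by_cases h : k' = k <;> simp [h]

-- the callees fold of A does not change the key list when the key is present
theorem pv_foldA_keys (cs : List String) (d : PySem.Dict String (List String)) (k : String)
    (hc : d.contains k = true) :
    (cs.foldl (fun d c => d.modify k [] (fun l => if c ∈ l then l else l ++ [c])) d).keys = d.keys := by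
  induction cs generalizing d with
  | nil => rfl
  | cons c cs ih =>
    have hc' : (d.modify k [] (fun l => if c ∈ l then l else l ++ [c])).contains k = true := by
      simp [PySem.Dict.contains_modify]
    simp only [List.foldl_cons, ih _ hc']
    rw [PySem.Dict.keys_modify, PySem.Dict.keys_insert_of_contains _ _ hc]

-- one step preserves the invariant
theorem pv_step_inv (dA dB : PySem.Dict String (List String)) (p : String × List String)
    (h : pvInv dA dB) : pvInv (pvStepA dA p) (pvStepB dB p) := by
  obtain ⟨hkeys, hnd, hval⟩ := h
  have hcont : dA.contains p.1 = dB.contains p.1 := by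
    rw [PySem.Dict.contains_eq_decide_mem_keys, PySem.Dict.contains_eq_decide_mem_keys, hkeys]
  -- the "ensure key" phase of A
  set dA' := if dA.contains p.1 then dA else dA.insert p.1 ([] : List String) with hdA'
  have hA'keys : dA'.keys = if dB.contains p.1 then dA.keys else dA.keys ++ [p.1] := by
    rw [hdA', hcont]
    cases hb : dB.contains p.1 with
    | true => simp
    | false => simp [PySem.Dict.keys_insert_of_not_contains _ _ (hcont.trans hb)]
  have hA'cont : dA'.contains p.1 = true := by
    rw [hdA']
    cases hb : dA.contains p.1 with
    | true => simpa using hb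
    | false => simp [PySem.Dict.contains_insert_self]
  have hA'val : ∀ k', dA'.getD k' [] = if k' = p.1 then PySem.List.dedup (dB.getD p.1 []) else dA.getD k' [] := by
    intro k'
    rw [hdA']
    cases hb : dA.contains p.1 with
    | true =>
      simp only [if_true]
      by_cases hk : k' = p.1
      · subst hk; simp [hval]
      · simp [hk]
    | false =>
      have hbB : dB.contains p.1 = false := hcont.symm.trans hb
      have hB0 : dB.getD p.1 [] = [] := PySem.Dict.getD_of_not_contains dB _ hbB
      simp only [Bool.false_eq_true, if_false, PySem.Dict.getD_insert, hB0]
      by_cases hk : k' = p.1 <;> simp [hk]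
  refine ⟨?_, ?_, ?_⟩
  · -- keys
    show (p.2.foldl (fun d c => d.modify p.1 [] (fun l => if c ∈ l then l else l ++ [c])) dA').keys
        = (dB.insert p.1 (dB.getD p.1 [] ++ p.2)).keys
    rw [pv_foldA_keys _ _ _ hA'cont, hA'keys]
    cases hb : dB.contains p.1 with
    | true => rw [PySem.Dict.keys_insert_of_contains _ _ hb, hkeys]; simp
    | false => rw [PySem.Dict.keys_insert_of_not_contains _ _ hb, hkeys]; simp
  · exact PySem.Dict.nodup_keys_insert _ _ _ hnd
  · intro k
    show (p.2.foldl (fun d c => d.modify p.1 [] (fun l => if c ∈ l then l else l ++ [c])) dA').getD k []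
        = PySem.List.dedup ((dB.insert p.1 (dB.getD p.1 [] ++ p.2)).getD k [])
    rw [pv_foldA_getD, PySem.Dict.getD_insert]
    by_cases hk : k = p.1
    · simp only [hk, if_true, hA'val p.1]
      exact pv_dedup_foldl _ _
    · simp only [if_neg hk, hA'val k, hval k]

-- the nested fold over all graphs preserves the invariant
theorem pv_run_inv (graphs : List (List (String × List String)))
    (dA dB : PySem.Dict String (List String)) (h : pvInv dA dB) :
    pvInv (graphs.foldl (fun d g => g.foldl pvStepA d) dA)
          (graphs.foldl (fun d g => g.foldl pvStepB d) dB) := by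
  induction graphs generalizing dA dB with
  | nil => exact h
  | cons g gs ihg =>
    simp only [List.foldl_cons]
    apply ihg
    clear ihg
    induction g generalizing dA dB with
    | nil => exact h
    | cons p ps ihp => exact ihp _ _ (pv_step_inv _ _ _ h)

-- ===== VERDICT (by name: the statement is the Claim_ definition above) =====
theorem merge_call_graphs_spec : Claim_equal_merge_call_graphs := by
  intro graphs _
  unfold Spec_merge_call_graphs
  have hA : merge_call_graphs graphs
      = (graphs.foldl (fun d g => g.foldl pvStepA d) PySem.Dict.empty).items := rfl
  have hB : merge_call_graphs_alt graphs
      = ((graphs.foldl (fun d g => g.foldl pvStepB d) PySem.Dict.empty).items).map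
          (fun p => (p.1, PySem.List.dedup p.2)) := rfl
  rw [hA, hB]
  obtain ⟨hkeys, hnd, hval⟩ :=
    pv_run_inv graphs PySem.Dict.empty PySem.Dict.empty ⟨rfl, List.nodup_nil, fun k => rfl⟩
  set dA := graphs.foldl (fun d g => g.foldl pvStepA d) PySem.Dict.empty
  set dB := graphs.foldl (fun d g => g.foldl pvStepB d) PySem.Dict.empty
  rw [PySem.Dict.items_eq_map_keys dA (hkeys ▸ hnd) ([] : List String),
      PySem.Dict.items_eq_map_keys dB hnd ([] : List String), hkeys, List.map_map]
  exact List.map_congr_left (fun k _ => by simp [Function.comp, hval k])
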